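-- pv_equiv track=rewrite | github.com/Thesarvesh19/Daily-Code-Chronicles | 2026/04-April/30-Thursday/solution.py | maxPathScore
-- ===== SOURCE A (Python) =====
-- def maxPathScore(grid, k):
--     m, n = len(grid), len(grid[0])
--     k = min(k, m + n)
--
--     dp = [[-1] * (k + 1) for _ in range(n)]
--     next_dp = [[-1] * (k + 1) for _ in range(n)]
--
--     dp[0][0] = 0
--
--     for i in range(m):
--         for j in range(n):
--             next_dp[j] = [-1] * (k + 1)
--
--             if i == 0 and j == 0:
--                 next_dp[0][0] = 0
--                 continue
--
--             val = grid[i][j]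
--             cost = 1 if val > 0 else 0
--
--             for c in range(cost, k + 1):
--                 prev_c = c - cost
--                 mx = -1
--
--                 if i > 0 and dp[j][prev_c] != -1:
--                     mx = dp[j][prev_c]
--                 if j > 0 and next_dp[j - 1][prev_c] != -1:
--                     mx = max(mx, next_dp[j - 1][prev_c])
--
--                 if mx != -1:
--                     next_dp[j][c] = mx + val
--
--         dp, next_dp = next_dp, dp
--
--     return max(dp[n - 1])
-- ===== SOURCE B (Python) =====
-- # Same exact-budget DP recurrence, but computed by a linear recursion over rows
-- # (each row built from the previous row's table) instead of A's imperative
-- # rolling buffers; same -1 unreachable sentinel and final max over budgets.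
-- def maxPathScore(grid, k):
--     m, n = len(grid), len(grid[0])
--     k = min(k, m + n)
--
--     def cell(i, j, above, left):
--         # above: table for row i-1 (None when i == 0); left: cell (i, j-1) (None when j == 0)
--         if i == 0 and j == 0:
--             return [0 if c == 0 else -1 for c in range(k + 1)]
--         val = grid[i][j]
--         cost = 1 if val > 0 else 0
--         out = []
--         for c in range(k + 1):
--             mx = -1
--             if c >= cost:
--                 if above is not None and above[j][c - cost] != -1:
--                     mx = above[j][c - cost]
--                 if left is not None and left[c - cost] != -1:
--                     mx = max(mx, left[c - cost])
--             out.append(mx + val if mx != -1 else -1)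
--         return out
--
--     def row(i, above):
--         r = []
--         for j in range(n):
--             r.append(cell(i, j, above, r[j - 1] if j > 0 else None))
--         return r
--
--     def table(i):
--         return row(i, table(i - 1) if i > 0 else None)
--
--     return max(table(m - 1)[n - 1])
-- ===== Notes on version B (the rewrite author's own statement) =====
-- stated objective: alternative
-- what changed: Replaces A's imperative rolling-buffer DP (two mutable n x (k+1) arrays, in-place cell writes and a buffer swap per row) by a top-down linear recursion over rows that functionally builds each row's table from the previous one, with per-cell list comprehensions over the full budget range.
-- outside the precondition, e.g. on maxPathScore([[1, 2], [3, 4]], -1): A raises IndexError, B raises ValueError; on maxPathScore([], 3): A raises IndexError, B raises IndexError; on maxPathScore([[1, 2], [3]], 2): A raises IndexError, B raises IndexError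
import Mathlib
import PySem

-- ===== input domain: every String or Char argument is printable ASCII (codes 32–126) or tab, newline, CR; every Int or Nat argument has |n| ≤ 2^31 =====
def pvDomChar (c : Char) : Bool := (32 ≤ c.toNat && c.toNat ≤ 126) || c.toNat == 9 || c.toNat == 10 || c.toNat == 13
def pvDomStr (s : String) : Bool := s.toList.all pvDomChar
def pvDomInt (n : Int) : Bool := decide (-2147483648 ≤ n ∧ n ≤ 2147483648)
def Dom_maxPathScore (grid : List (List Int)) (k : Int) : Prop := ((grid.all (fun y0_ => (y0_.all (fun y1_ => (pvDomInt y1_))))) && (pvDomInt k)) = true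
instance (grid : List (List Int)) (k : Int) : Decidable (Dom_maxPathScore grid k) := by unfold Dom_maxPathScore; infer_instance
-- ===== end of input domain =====

-- B recomputes A's exact-budget DP table by a linear recursion over rows (each row a
-- functional build from the previous row) instead of A's imperative rolling buffers;
-- same recurrence, same -1 sentinel, same final max over budgets; objective: alternative.

-- ===== PORT A =====
-- [-1] * (k + 1)
def pvNewRow (k : Int) : List Int := List.replicate (k + 1).toNat (-1)

-- the value of mx after the two conditional reassignments in A's innermost loop
def pvMx (dp nd : List (List Int)) (i j cost c : Int) : Int :=
  let prev_c := c - cost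
  let mx : Int := -1
  let mx := if 0 < i ∧ PySem.List.pyGetD (PySem.List.pyGetD dp j []) prev_c 0 ≠ -1
            then PySem.List.pyGetD (PySem.List.pyGetD dp j []) prev_c 0 else mx
  if 0 < j ∧ PySem.List.pyGetD (PySem.List.pyGetD nd (j - 1) []) prev_c 0 ≠ -1
  then max mx (PySem.List.pyGetD (PySem.List.pyGetD nd (j - 1) []) prev_c 0) else mx

-- body of 'for c in range(cost, k + 1)': possibly assigns next_dp[j][c]
def pvAStepC (dp nd : List (List Int)) (i j cost val : Int) (row : List Int) (c : Int) : List Int :=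
  if pvMx dp nd i j cost c ≠ -1 then PySem.List.pySetD row c (pvMx dp nd i j cost c + val) else row

-- body of 'for j in range(n)': next_dp[j] is reset, then filled (the c-loop mutates
-- next_dp[j] in place; it only reads next_dp[j-1], so building the row and writing it
-- back once is exact)
def pvAInner (grid : List (List Int)) (k i j : Int) (dp nd : List (List Int)) : List (List Int) :=
  let nd := PySem.List.pySetD nd j (pvNewRow k)
  if i = 0 ∧ j = 0 then
    PySem.List.pySetD nd 0 (PySem.List.pySetD (PySem.List.pyGetD nd 0 []) 0 0)
  else
    let val := PySem.List.pyGetD (PySem.List.pyGetD grid i []) j 0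
    let cost : Int := if val > 0 then 1 else 0
    PySem.List.pySetD nd j
      ((PySem.List.pyRange cost (k + 1) 1).foldl (pvAStepC dp nd i j cost val)
        (PySem.List.pyGetD nd j []))

-- 'for j in range(n)'
def pvARow (grid : List (List Int)) (k n i : Int) (dp nd : List (List Int)) : List (List Int) :=
  (PySem.List.pyRange 0 n 1).foldl (fun nd j => pvAInner grid k i j dp nd) nd

def maxPathScore (grid : List (List Int)) (k : Int) : Int :=
  let m : Int := PySem.List.len grid
  let n : Int := PySem.List.len ((PySem.List.pyGet? grid 0).getD [])
  let k : Int := min k (m + n)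
  let dp : List (List Int) := (PySem.List.pyRange 0 n 1).map (fun _ => pvNewRow k)
  let nd : List (List Int) := (PySem.List.pyRange 0 n 1).map (fun _ => pvNewRow k)
  let dp := PySem.List.pySetD dp 0 (PySem.List.pySetD (PySem.List.pyGetD dp 0 []) 0 0)
  -- 'for i in range(m)' with the final swap 'dp, next_dp = next_dp, dp'
  let st := (PySem.List.pyRange 0 m 1).foldl
    (fun (st : List (List Int) × List (List Int)) i => (pvARow grid k n i st.1 st.2, st.1)) (dp, nd)
  -- max(dp[n-1]); the .getD 0 default is unreachable under Pre_ (the row has k+1 ≥ 1 entries)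
  (PySem.List.max? (PySem.List.pyGetD st.1 (n - 1) []) (fun x => x)).getD 0

-- ===== PORT B =====
-- cell(i, j, above, left) of Source B
def pvBCell (grid : List (List Int)) (k i j : Int)
    (above : Option (List (List Int))) (left : Option (List Int)) : List Int :=
  if i = 0 ∧ j = 0 then
    (PySem.List.pyRange 0 (k + 1) 1).map (fun c => if c = 0 then 0 else -1)
  else
    let val := PySem.List.pyGetD (PySem.List.pyGetD grid i []) j 0
    let cost : Int := if val > 0 then 1 else 0
    (PySem.List.pyRange 0 (k + 1) 1).foldl (fun out c =>
      let mx : Int := -1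
      let mx := if cost ≤ c then
          let mx := match above with
            | some ab => if PySem.List.pyGetD (PySem.List.pyGetD ab j []) (c - cost) 0 ≠ -1
                         then PySem.List.pyGetD (PySem.List.pyGetD ab j []) (c - cost) 0 else mx
            | none => mx
          match left with
            | some lf => if PySem.List.pyGetD lf (c - cost) 0 ≠ -1
                         then max mx (PySem.List.pyGetD lf (c - cost) 0) else mx
            | none => mx
        else mx
      out ++ [if mx ≠ -1 then mx + val else -1]) []

-- row(i, above) of Source B
def pvBRow (grid : List (List Int)) (k n i : Int) (above : Option (List (List Int))) : List (List Int) :=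
  (PySem.List.pyRange 0 n 1).foldl (fun r j =>
    r ++ [pvBCell grid k i j above
            (if 0 < j then some (PySem.List.pyGetD r (j - 1) []) else none)]) []

-- table(i) of Source B (recursion on the row number; i ≥ 0 in every call)
def pvBTable (grid : List (List Int)) (k n : Int) : Nat → List (List Int)
  | 0 => pvBRow grid k n 0 none
  | i + 1 => pvBRow grid k n ((i : Int) + 1) (some (pvBTable grid k n i))

def maxPathScore_alt (grid : List (List Int)) (k : Int) : Int :=
  let m : Int := PySem.List.len grid
  let n : Int := PySem.List.len ((PySem.List.pyGet? grid 0).getD [])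
  let k : Int := min k (m + n)
  (PySem.List.max? (PySem.List.pyGetD (pvBTable grid k n (m - 1).toNat) (n - 1) [])
    (fun x => x)).getD 0

-- ===== PRECONDITION & SPEC =====
-- Pre_ excludes exactly the inputs where the Python A raises: an empty grid or an empty
-- first row (IndexError), a row shorter than the first (IndexError on grid[i][j]), and
-- k < 0 (the budget lists are empty, so dp[0][0] = 0 raises IndexError).
def Pre_maxPathScore (grid : List (List Int)) (k : Int) : Prop :=
  grid ≠ [] ∧ grid.getD 0 [] ≠ [] ∧ 0 ≤ k ∧
    ∀ row ∈ grid, (grid.getD 0 []).length ≤ row.length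
instance (grid : List (List Int)) (k : Int) : Decidable (Pre_maxPathScore grid k) := by
  unfold Pre_maxPathScore; infer_instance

def pvWitness_maxPathScore : List (List Int) × Int := ([[0, 3], [2, -1]], 1)

def Spec_maxPathScore (grid : List (List Int)) (k : Int) (out : Int) : Prop := out = maxPathScore_alt grid k
instance (grid : List (List Int)) (k : Int) (out : Int) : Decidable (Spec_maxPathScore grid k out) := by unfold Spec_maxPathScore; infer_instance

-- ===== CLAIM (what is proved, stated in full; the proofs are below) =====
def Claim_equal_maxPathScore : Prop := ∀ (grid : List (List Int)) (k : Int), Dom_maxPathScore grid k → Pre_maxPathScore grid k → Spec_maxPathScore grid k (maxPathScore grid k)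

-- ===== LEMMAS AND PROOFS =====

theorem maxPathScore_witness_ok :
    Dom_maxPathScore pvWitness_maxPathScore.1 pvWitness_maxPathScore.2 ∧
    Pre_maxPathScore pvWitness_maxPathScore.1 pvWitness_maxPathScore.2 := by decide


-- the list built by Source B's row loop: element t is computed from the prefix of length t
def pvBuild (f : List (List Int) → Int → List Int) : Nat → List (List Int)
  | 0 => []
  | t + 1 => pvBuild f t ++ [f (pvBuild f t) (t : Int)]

theorem pvBuild_length (f : List (List Int) → Int → List Int) (t : Nat) :
    (pvBuild f t).length = t := by
  induction t with
  | zero => rfl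
  | succ u ih => simp [pvBuild, ih]

theorem pvFoldBuild (f : List (List Int) → Int → List Int) (n : Int) :
    ∀ (d t : Nat), (n - (t : Int)).toNat = d → (t : Int) ≤ n →
      (PySem.List.pyRange (t : Int) n 1).foldl (fun r j => r ++ [f r j]) (pvBuild f t)
        = pvBuild f n.toNat := by
  intro d
  induction d with
  | zero =>
    intro t hd ht
    have hnt : n = (t : Int) := by omega
    have h2 : n.toNat = t := by omega
    rw [PySem.List.pyRange_one_eq_nil (le_of_eq hnt), h2]
    rfl
  | succ d ih =>
    intro t hd ht
    have hlt : (t : Int) < n := by omega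
    rw [PySem.List.pyRange_one_cons hlt]
    simp only [List.foldl_cons]
    have hstep : pvBuild f t ++ [f (pvBuild f t) (t : Int)] = pvBuild f (t + 1) := rfl
    rw [hstep]
    have hcast : ((t + 1 : Nat) : Int) = (t : Int) + 1 := by push_cast; ring
    have := ih (t + 1) (by omega) (by omega)
    rw [hcast] at this
    exact this

theorem pvBRow_eq (grid : List (List Int)) (k n i : Int)
    (above : Option (List (List Int))) (hn : 0 ≤ n) :
    pvBRow grid k n i above
      = pvBuild (fun r j => pvBCell grid k i j above
          (if 0 < j then some (PySem.List.pyGetD r (j - 1) []) else none)) n.toNat := by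
  unfold pvBRow
  have := pvFoldBuild (fun r j => pvBCell grid k i j above
      (if 0 < j then some (PySem.List.pyGetD r (j - 1) []) else none)) n n.toNat 0
      (by omega) (by omega)
  simpa using this

theorem pvBRow_length (grid : List (List Int)) (k n i : Int)
    (above : Option (List (List Int))) (hn : 0 ≤ n) :
    (pvBRow grid k n i above).length = n.toNat := by
  rw [pvBRow_eq grid k n i above hn, pvBuild_length]

theorem pvBTable_length (grid : List (List Int)) (k n : Int) (hn : 0 ≤ n) (t : Nat) :
    (pvBTable grid k n t).length = n.toNat := by
  cases t with
  | zero => exact pvBRow_length _ _ _ _ _ hn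
  | succ u => exact pvBRow_length _ _ _ _ _ hn

theorem pvFoldC_get (dp nd : List (List Int)) (i j cost val : Int) (b : Int) :
    ∀ (d : Nat) (a : Int), 0 ≤ a → (b - a).toNat = d →
    ∀ s : List Int, b ≤ (s.length : Int) → ∀ c0 : Nat,
      ((PySem.List.pyRange a b 1).foldl (pvAStepC dp nd i j cost val) s)[c0]? =
        if a ≤ (c0 : Int) ∧ (c0 : Int) < b ∧ pvMx dp nd i j cost (c0 : Int) ≠ -1
        then some (pvMx dp nd i j cost (c0 : Int) + val)
        else s[c0]? := by
  intro d
  induction d with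
  | zero =>
    intro a ha hd s hs c0
    rw [PySem.List.pyRange_one_eq_nil (by omega)]
    simp only [List.foldl_nil]
    rw [if_neg]
    rintro ⟨h1, h2, -⟩
    omega
  | succ d ih =>
    intro a ha hd s hs c0
    have hab : a < b := by omega
    rw [PySem.List.pyRange_one_cons hab]
    simp only [List.foldl_cons]
    have hlen : (pvAStepC dp nd i j cost val s a).length = s.length := by
      unfold pvAStepC
      split
      · rw [PySem.List.length_pySetD]
      · rfl
    rw [ih (a + 1) (by omega) (by omega) _ (by rw [hlen]; exact hs) c0]
    by_cases hca : (c0 : Int) = a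
    · -- c0 is the index written (or skipped) in this step
      subst hca
      have hc0lt : c0 < s.length := by omega
      unfold pvAStepC
      rw [if_neg (by omega)]
      split
      · next hmx =>
        rw [PySem.List.pySetD_of_nonneg _ _ ha]
        have hat : ((c0 : Int)).toNat = c0 := by omega
        rw [hat, List.getElem?_set_self hc0lt, if_pos ⟨by omega, by omega, hmx⟩]
      · next hmx =>
        rw [if_neg]
        rintro ⟨-, -, h3⟩
        exact hmx h3
    · -- c0 untouched by this step
      have hsc : (pvAStepC dp nd i j cost val s a)[c0]? = s[c0]? := by
        unfold pvAStepC
        split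
        · rw [PySem.List.pySetD_of_nonneg _ _ ha, List.getElem?_set_ne (by omega)]
        · rfl
      rw [hsc]
      by_cases hcond : a ≤ (c0 : Int) ∧ (c0 : Int) < b ∧ pvMx dp nd i j cost (c0 : Int) ≠ -1
      · rw [if_pos ⟨by omega, hcond.2.1, hcond.2.2⟩, if_pos hcond]
      · rw [if_neg (by rintro ⟨h1, h2, h3⟩; exact hcond ⟨by omega, h2, h3⟩), if_neg hcond]

theorem pvCell_eq (grid : List (List Int)) (k i j : Int) (dp nd : List (List Int))
    (hij : ¬(i = 0 ∧ j = 0)) :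
    (PySem.List.pyRange (if PySem.List.pyGetD (PySem.List.pyGetD grid i []) j 0 > 0 then 1 else 0)
        (k + 1) 1).foldl
      (pvAStepC dp nd i j
        (if PySem.List.pyGetD (PySem.List.pyGetD grid i []) j 0 > 0 then 1 else 0)
        (PySem.List.pyGetD (PySem.List.pyGetD grid i []) j 0)) (pvNewRow k)
    = pvBCell grid k i j (if 0 < i then some dp else none)
        (if 0 < j then some (PySem.List.pyGetD nd (j - 1) []) else none) := by
  set val := PySem.List.pyGetD (PySem.List.pyGetD grid i []) j 0 with hval
  set cost : Int := if val > 0 then 1 else 0 with hcost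
  have hc0 : 0 ≤ cost := by rw [hcost]; split <;> omega
  unfold pvBCell
  rw [if_neg hij]
  -- turn Source B's append loop into a map
  have hmap :
      (PySem.List.pyRange 0 (k + 1) 1).foldl (fun out c =>
        let mx : Int := -1
        let mx := if cost ≤ c then
            let mx := match (if 0 < i then some dp else none) with
              | some ab => if PySem.List.pyGetD (PySem.List.pyGetD ab j []) (c - cost) 0 ≠ -1
                           then PySem.List.pyGetD (PySem.List.pyGetD ab j []) (c - cost) 0 else mx
              | none => mx
            match (if 0 < j then some (PySem.List.pyGetD nd (j - 1) []) else none) with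
              | some lf => if PySem.List.pyGetD lf (c - cost) 0 ≠ -1
                           then max mx (PySem.List.pyGetD lf (c - cost) 0) else mx
              | none => mx
          else mx
        out ++ [if mx ≠ -1 then mx + val else -1]) [] =
      [] ++ (PySem.List.pyRange 0 (k + 1) 1).map (fun c =>
        let mx : Int := -1
        let mx := if cost ≤ c then
            let mx := match (if 0 < i then some dp else none) with
              | some ab => if PySem.List.pyGetD (PySem.List.pyGetD ab j []) (c - cost) 0 ≠ -1
                           then PySem.List.pyGetD (PySem.List.pyGetD ab j []) (c - cost) 0 else mx
              | none => mx
            match (if 0 < j then some (PySem.List.pyGetD nd (j - 1) []) else none) with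
              | some lf => if PySem.List.pyGetD lf (c - cost) 0 ≠ -1
                           then max mx (PySem.List.pyGetD lf (c - cost) 0) else mx
              | none => mx
          else mx
        if mx ≠ -1 then mx + val else -1) :=
    PySem.List.foldl_append_singleton_eq_map _ _ []
  rw [hmap, List.nil_append]
  -- the per-budget value of Source B's loop body
  have hfun : (fun c : Int =>
      let mx : Int := -1
      let mx := if cost ≤ c then
          let mx := match (if 0 < i then some dp else none) with
            | some ab => if PySem.List.pyGetD (PySem.List.pyGetD ab j []) (c - cost) 0 ≠ -1
                         then PySem.List.pyGetD (PySem.List.pyGetD ab j []) (c - cost) 0 else mx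
            | none => mx
          match (if 0 < j then some (PySem.List.pyGetD nd (j - 1) []) else none) with
            | some lf => if PySem.List.pyGetD lf (c - cost) 0 ≠ -1
                         then max mx (PySem.List.pyGetD lf (c - cost) 0) else mx
            | none => mx
        else mx
      if mx ≠ -1 then mx + val else -1)
      = (fun c : Int => if cost ≤ c ∧ pvMx dp nd i j cost c ≠ -1
          then pvMx dp nd i j cost c + val else -1) := by
    funext c
    by_cases hi : 0 < i <;> by_cases hj : 0 < j <;>
      simp only [pvMx, hi, hj, if_true, if_false, true_and, false_and] <;>
      by_cases hcc : cost ≤ c <;>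
      simp only [hcc, if_true, if_false, true_and, false_and] <;> rfl
  rw [hfun]
  apply List.ext_getElem?
  intro c0
  rw [pvFoldC_get dp nd i j cost val (k + 1) (k + 1 - cost).toNat cost hc0 rfl (pvNewRow k)
        (by unfold pvNewRow; rw [List.length_replicate]; omega) c0]
  rw [List.getElem?_map, PySem.List.getElem?_pyRange_one]
  unfold pvNewRow
  rw [List.getElem?_replicate]
  simp only [sub_zero]
  by_cases hin : c0 < (k + 1).toNat
  · simp only [hin, if_true, Option.map_some, zero_add]
    by_cases hcc : cost ≤ (c0 : Int)
    · by_cases hm : pvMx dp nd i j cost (c0 : Int) = -1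
      · rw [if_neg (by rintro ⟨-, -, h⟩; exact h hm), if_neg (by rintro ⟨-, h⟩; exact h hm)]
      · rw [if_pos ⟨hcc, by omega, hm⟩, if_pos ⟨hcc, hm⟩]
    · rw [if_neg (by rintro ⟨h, -, -⟩; exact hcc h), if_neg (by rintro ⟨h, -⟩; exact hcc h)]
  · simp only [hin, if_false, Option.map_none]
    rw [if_neg (by rintro ⟨-, h, -⟩; omega)]

theorem pvStartCell (k : Int) :
    (pvNewRow k).set 0 0 = (PySem.List.pyRange 0 (k + 1) 1).map (fun c => if c = 0 then 0 else -1) := by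
  apply List.ext_getElem?
  intro c0
  rw [List.getElem?_map, PySem.List.getElem?_pyRange_one]
  by_cases h0 : c0 = 0
  · subst h0
    by_cases hk : 0 < (k + 1).toNat
    · rw [List.getElem?_set_self (by unfold pvNewRow; simpa using hk), if_pos (by omega)]
      simp
    · have hz : (k + 1).toNat = 0 := by omega
      unfold pvNewRow
      simp [hz]
  · rw [List.getElem?_set_ne (by omega)]
    unfold pvNewRow
    rw [List.getElem?_replicate]
    by_cases hin : c0 < (k + 1).toNat
    · rw [if_pos hin, if_pos (by omega), Option.map_some]
      simp only [zero_add]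
      rw [if_neg (by exact_mod_cast h0)]
    · rw [if_neg hin, if_neg (by omega), Option.map_none]

theorem pvAInner_eq (grid : List (List Int)) (k i : Int) (t : Nat) (dp nd : List (List Int))
    (hlen : t < nd.length) :
    pvAInner grid k i (t : Int) dp nd =
      PySem.List.pySetD nd (t : Int)
        (pvBCell grid k i (t : Int) (if 0 < i then some dp else none)
          (if 0 < (t : Int) then some (PySem.List.pyGetD nd ((t : Int) - 1) []) else none)) := by
  unfold pvAInner
  by_cases hij : i = 0 ∧ (t : Int) = 0
  · obtain ⟨hi0, ht0⟩ := hij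
    have ht : t = 0 := by omega
    subst ht hi0
    rw [if_pos ⟨rfl, rfl⟩]
    have hget : PySem.List.pyGetD (PySem.List.pySetD nd ((0 : Nat) : Int) (pvNewRow k)) ((0 : Nat) : Int) [] = pvNewRow k := by
      rw [PySem.List.pyGetD_pySetD_natCast nd 0 0 (pvNewRow k) [] hlen, if_pos rfl]
    simp only [Nat.cast_zero] at hget ⊢
    rw [hget]
    rw [PySem.List.pySetD_of_nonneg _ _ (le_refl (0 : Int)),
        PySem.List.pySetD_of_nonneg _ _ (le_refl (0 : Int)),
        PySem.List.pySetD_of_nonneg _ _ (le_refl (0 : Int))]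
    rw [List.set_set]
    simp only [Int.toNat_zero]
    rw [pvStartCell k]
    have hcell : pvBCell grid k 0 0 (if 0 < (0 : Int) then some dp else none)
        (if 0 < (0 : Int) then some (PySem.List.pyGetD nd (0 - 1) []) else none)
        = (PySem.List.pyRange 0 (k + 1) 1).map (fun c => if c = 0 then 0 else -1) := by
      unfold pvBCell
      rw [if_pos ⟨rfl, rfl⟩]
    rw [hcell, PySem.List.pySetD_of_nonneg _ _ (le_refl (0 : Int)), Int.toNat_zero]
  · rw [if_neg hij]
    simp only []
    have hget : PySem.List.pyGetD (PySem.List.pySetD nd ((t : Nat) : Int) (pvNewRow k)) ((t : Nat) : Int) [] = pvNewRow k := by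
      rw [PySem.List.pyGetD_pySetD_natCast nd t t (pvNewRow k) [] hlen, if_pos rfl]
    rw [hget]
    rw [pvCell_eq grid k i (t : Int) dp (PySem.List.pySetD nd (t : Int) (pvNewRow k)) hij]
    have hleft : (if 0 < (t : Int) then
          some (PySem.List.pyGetD (PySem.List.pySetD nd (t : Int) (pvNewRow k)) ((t : Int) - 1) []) else none)
        = (if 0 < (t : Int) then some (PySem.List.pyGetD nd ((t : Int) - 1) []) else none) := by
      by_cases hx : 0 < (t : Int)
      · rw [if_pos hx, if_pos hx]
        have h1 : ((t : Int) - 1) = ((t - 1 : Nat) : Int) := by omega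
        rw [h1, PySem.List.pyGetD_pySetD_natCast nd t (t - 1) (pvNewRow k) [] hlen,
            if_neg (by omega)]
      · rw [if_neg hx, if_neg hx]
    rw [hleft]
    rw [PySem.List.pySetD_natCast, PySem.List.pySetD_natCast, PySem.List.pySetD_natCast,
        List.set_set]


theorem pvSetTakeStep {v : List Int} {nd : List (List Int)} {t : Nat} (h : t < nd.length) :
    (nd.set t v).take (t + 1) = nd.take t ++ [v] := by
  rw [List.take_add_one, List.take_set, List.getElem?_set_self h]
  have : (nd.take t).set t v = nd.take t := by
    apply List.set_eq_of_length_le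
    rw [List.length_take]
    omega
  rw [this]
  rfl

theorem pvARow_eq (grid : List (List Int)) (k n i : Int) (dp : List (List Int)) :
    ∀ (d t : Nat) (nd : List (List Int)), (n - (t : Int)).toNat = d → (t : Int) ≤ n →
      nd.length = n.toNat →
      nd.take t = pvBuild (fun r j => pvBCell grid k i j (if 0 < i then some dp else none)
        (if 0 < j then some (PySem.List.pyGetD r (j - 1) []) else none)) t →
      (PySem.List.pyRange (t : Int) n 1).foldl (fun nd j => pvAInner grid k i j dp nd) nd
        = pvBuild (fun r j => pvBCell grid k i j (if 0 < i then some dp else none)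
            (if 0 < j then some (PySem.List.pyGetD r (j - 1) []) else none)) n.toNat := by
  intro d
  induction d with
  | zero =>
    intro t nd hd ht hlen htake
    have hnt : n = (t : Int) := by omega
    rw [PySem.List.pyRange_one_eq_nil (le_of_eq hnt)]
    simp only [List.foldl_nil]
    have h1 : t = n.toNat := by omega
    have h2 : nd = pvBuild (fun r j => pvBCell grid k i j (if 0 < i then some dp else none)
        (if 0 < j then some (PySem.List.pyGetD r (j - 1) []) else none)) t := by
      rw [← htake, List.take_of_length_le (by omega)]
    rw [h2, h1]
  | succ d ih =>
    intro t nd hd ht hlen htake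
    have hlt : (t : Int) < n := by omega
    rw [PySem.List.pyRange_one_cons hlt]
    simp only [List.foldl_cons]
    have htlen : t < nd.length := by omega
    rw [pvAInner_eq grid k i t dp nd htlen]
    have hv : (if 0 < (t : Int) then some (PySem.List.pyGetD nd ((t : Int) - 1) []) else none)
        = (if 0 < (t : Int) then some (PySem.List.pyGetD (pvBuild (fun r j => pvBCell grid k i j
            (if 0 < i then some dp else none)
            (if 0 < j then some (PySem.List.pyGetD r (j - 1) []) else none)) t) ((t : Int) - 1) []) else none) := by
      by_cases hx : 0 < (t : Int)
      · rw [if_pos hx, if_pos hx]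
        have ht1 : ((t : Int) - 1) = ((t - 1 : Nat) : Int) := by omega
        rw [ht1, PySem.List.pyGetD_natCast, PySem.List.pyGetD_natCast]
        have hq : nd[t-1]? = (pvBuild (fun r j => pvBCell grid k i j
            (if 0 < i then some dp else none)
            (if 0 < j then some (PySem.List.pyGetD r (j - 1) []) else none)) t)[t-1]? := by
          have := List.getElem?_take (l := nd) (i := t) (j := t - 1)
          rw [if_pos (by omega)] at this
          rw [← this, htake]
        rw [List.getD_eq_getElem?_getD, List.getD_eq_getElem?_getD, hq]
      · rw [if_neg hx, if_neg hx]
    rw [hv]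
    rw [PySem.List.pySetD_natCast]
    have hcast : ((t + 1 : Nat) : Int) = (t : Int) + 1 := by push_cast; ring
    have htk : (nd.set t (pvBCell grid k i (t : Int) (if 0 < i then some dp else none)
        (if 0 < (t : Int) then some (PySem.List.pyGetD (pvBuild (fun r j => pvBCell grid k i j
          (if 0 < i then some dp else none)
          (if 0 < j then some (PySem.List.pyGetD r (j - 1) []) else none)) t) ((t : Int) - 1) []) else none))).take (t + 1)
        = pvBuild (fun r j => pvBCell grid k i j (if 0 < i then some dp else none)
          (if 0 < j then some (PySem.List.pyGetD r (j - 1) []) else none)) (t + 1) := by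
      rw [pvSetTakeStep htlen, htake]
      rfl
    have := ih (t + 1) _ (by omega) (by omega) (by rw [List.length_set]; exact hlen) htk
    rw [hcast] at this
    exact this

theorem pvOuter (grid : List (List Int)) (k n : Int) (hn : 0 < n) :
    ∀ t : Nat, 1 ≤ t →
      (((PySem.List.pyRange 0 (t : Int) 1).foldl
          (fun (st : List (List Int) × List (List Int)) i => (pvARow grid k n i st.1 st.2, st.1))
          (PySem.List.pySetD ((PySem.List.pyRange 0 n 1).map (fun _ => pvNewRow k)) 0
            (PySem.List.pySetD (PySem.List.pyGetD ((PySem.List.pyRange 0 n 1).map (fun _ => pvNewRow k)) 0 []) 0 0),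
           (PySem.List.pyRange 0 n 1).map (fun _ => pvNewRow k))).1 = pvBTable grid k n (t - 1)) ∧
      (((PySem.List.pyRange 0 (t : Int) 1).foldl
          (fun (st : List (List Int) × List (List Int)) i => (pvARow grid k n i st.1 st.2, st.1))
          (PySem.List.pySetD ((PySem.List.pyRange 0 n 1).map (fun _ => pvNewRow k)) 0
            (PySem.List.pySetD (PySem.List.pyGetD ((PySem.List.pyRange 0 n 1).map (fun _ => pvNewRow k)) 0 []) 0 0),
           (PySem.List.pyRange 0 n 1).map (fun _ => pvNewRow k))).2.length = n.toNat) := by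
  have hmaplen : (((PySem.List.pyRange 0 n 1).map (fun _ => pvNewRow k)) : List (List Int)).length = n.toNat := by
    rw [List.length_map, PySem.List.length_pyRange_one]
    omega
  have hrow0 : ∀ dp0 nd0 : List (List Int), nd0.length = n.toNat →
      pvARow grid k n 0 dp0 nd0 = pvBTable grid k n 0 := by
    intro dp0 nd0 hlen
    unfold pvARow
    have h0 : ((0 : Nat) : Int) = 0 := by norm_num
    have := pvARow_eq grid k n 0 dp0 n.toNat 0 nd0 (by omega) (by omega) hlen (by simp [pvBuild])
    rw [h0] at this
    rw [this]
    show _ = pvBRow grid k n 0 none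
    rw [pvBRow_eq grid k n 0 none (by omega)]
    have : (if (0:Int) < 0 then some dp0 else none) = (none : Option (List (List Int))) := by norm_num
    rw [this]
  have hrowS : ∀ (u : Nat) (nd0 : List (List Int)), nd0.length = n.toNat →
      pvARow grid k n ((u + 1 : Nat) : Int) (pvBTable grid k n u) nd0 = pvBTable grid k n (u + 1) := by
    intro u nd0 hlen
    unfold pvARow
    have := pvARow_eq grid k n ((u + 1 : Nat) : Int) (pvBTable grid k n u) n.toNat 0 nd0
        (by omega) (by omega) hlen (by simp [pvBuild])
    simp only [Nat.cast_zero] at this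
    rw [this]
    show _ = pvBRow grid k n ((u : Int) + 1) (some (pvBTable grid k n u))
    rw [pvBRow_eq grid k n ((u : Int) + 1) (some (pvBTable grid k n u)) (by omega)]
    have h1 : ((u + 1 : Nat) : Int) = (u : Int) + 1 := by push_cast; ring
    have h2 : (if (0:Int) < ((u + 1 : Nat) : Int) then some (pvBTable grid k n u) else none)
        = some (pvBTable grid k n u) := by rw [if_pos (by omega)]
    rw [h1] at h2 ⊢
    rw [h2]
  intro t
  induction t with
  | zero => omega
  | succ u ihu =>
    intro _
    by_cases hu : 1 ≤ u
    · obtain ⟨ih1, ih2⟩ := ihu hu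
      have hsplit : (PySem.List.pyRange 0 ((u + 1 : Nat) : Int) 1)
          = PySem.List.pyRange 0 ((u : Nat) : Int) 1 ++ [((u : Nat) : Int)] := by
        have h1 : ((u + 1 : Nat) : Int) = ((u : Nat) : Int) + 1 := by push_cast; ring
        rw [h1, PySem.List.pyRange_one_succ_right (by omega)]
      rw [hsplit, List.foldl_append]
      simp only [List.foldl_cons, List.foldl_nil]
      constructor
      · have h := hrowS (u - 1) _ ih2
        rw [show u - 1 + 1 = u from by omega] at h
        rw [ih1]
        simpa using h
      · rw [ih1]
        rw [pvBTable_length grid k n (by omega) (u - 1)]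
    · have hu0 : u = 0 := by omega
      subst hu0
      have hone : (PySem.List.pyRange 0 ((1 : Nat) : Int) 1) = [0] := by
        rw [show ((1 : Nat) : Int) = (0 : Int) + 1 by norm_num, PySem.List.pyRange_one_singleton]
      rw [hone]
      simp only [List.foldl_cons, List.foldl_nil]
      constructor
      · exact hrow0 _ _ hmaplen
      · rw [PySem.List.length_pySetD]
        exact hmaplen

-- ===== VERDICT (by name: the statement is the Claim_ definition above) =====
theorem maxPathScore_spec : Claim_equal_maxPathScore := by
  intro grid k0 _ hpre
  obtain ⟨hne, hr0, hk, -⟩ := hpre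
  obtain ⟨r, rs, rfl⟩ := List.exists_cons_of_ne_nil hne
  have hrlen : 0 < r.length := by
    have hgd : (r :: rs).getD 0 [] = r := rfl
    rw [hgd] at hr0
    exact List.length_pos_of_ne_nil hr0
  unfold Spec_maxPathScore maxPathScore maxPathScore_alt
  simp only [PySem.List.len_eq, PySem.List.pyGet?_zero, List.getElem?_cons_zero, Option.getD_some]
  have hout := pvOuter (r :: rs) (min k0 (((r :: rs).length : Int) + (r.length : Int)))
      ((r.length : Int)) (by exact_mod_cast hrlen) ((r :: rs).length) (by simp)
  rw [hout.1]
  have hidx : (((r :: rs).length : Int) - 1).toNat = (r :: rs).length - 1 := by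
    simp [List.length_cons]
  rw [hidx]
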